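-- pv_equiv track=rewrite | github.com/flaar94/job-thesaurus | static/python/frontend.py | reorder_titles_vertical
-- ===== SOURCE A (Python) =====
-- import itertools
--
-- def reorder_titles_vertical(raw_data: iter):
--     raw_data = list(raw_data)
--     raw_data = raw_data[1:]
--     length = len(raw_data)
--     remainders = len(raw_data) % 4
--     breaks = [len(raw_data) // 4 + 1 if i < remainders else len(raw_data) // 4 for i in range(4)]
--     breaks = itertools.accumulate(breaks)
--     breaks = list(breaks)
--     breaks.insert(0, 0)
--     raw_data = [[x for x in raw_data[breaks[i]:breaks[i + 1]]] for i in range(4)]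
--     data = [raw_data[i][j] for j in range(length // 4) for i in range(4)]
--     for i in range(remainders):
--         data.append(raw_data[i][length // 4])
--     return data
-- ===== SOURCE B (Python) =====
-- def reorder_titles_vertical(raw_data: iter):
--     # Same return value as A: drop the header, then read the 4 vertical columns
--     # row-major via a closed-form index, with no column lists or tail loop.
--     data = list(raw_data)[1:]
--     q, r = divmod(len(data), 4)
--     return [data[(k % 4) * q + min(k % 4, r) + k // 4] for k in range(len(data))]
-- ===== Notes on version B (the rewrite author's own statement) =====
-- stated objective: alternative
-- what changed: B replaces A's breaks/accumulate bookkeeping, the four materialized column lists, the nested full-rows index loop and the separate remainder-append loop by a single comprehension that maps each output position k to its source element via the closed-form index (k%4)*q + min(k%4, r) + k//4.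
import Mathlib
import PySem

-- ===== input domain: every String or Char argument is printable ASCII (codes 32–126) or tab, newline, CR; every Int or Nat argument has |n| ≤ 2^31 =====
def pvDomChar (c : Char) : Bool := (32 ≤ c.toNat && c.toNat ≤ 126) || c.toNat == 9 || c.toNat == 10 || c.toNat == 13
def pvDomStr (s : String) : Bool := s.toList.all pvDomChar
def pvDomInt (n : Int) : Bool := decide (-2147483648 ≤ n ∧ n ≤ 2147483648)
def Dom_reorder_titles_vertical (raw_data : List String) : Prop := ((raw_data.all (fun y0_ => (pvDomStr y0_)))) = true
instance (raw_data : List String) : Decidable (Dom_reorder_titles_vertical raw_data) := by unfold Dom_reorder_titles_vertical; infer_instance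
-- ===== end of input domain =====

-- B is an alternative decomposition: instead of building 4 column lists and reading
-- them with a full-rows loop plus a remainder loop, it returns one comprehension
-- whose closed-form index maps output position k straight to its source element.

-- ===== PORT A =====
-- itertools.accumulate (running sums, no initial element)
def pvAccum : Int → List Int → List Int
  | _, [] => []
  | acc, x :: xs => (acc + x) :: pvAccum (acc + x) xs

def reorder_titles_vertical (raw_data : List String) : List String :=
  let raw1 := PySem.List.slice raw_data (some 1) none          -- raw_data[1:]
  let length : Int := raw1.length
  let remainders : Int := PySem.Int.mod length 4
  let breaks0 : List Int := (PySem.List.pyRange 0 4 1).map (fun i =>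
      if i < remainders then PySem.Int.floordiv length 4 + 1 else PySem.Int.floordiv length 4)
  let breaks1 := pvAccum 0 breaks0                             -- itertools.accumulate
  let breaks := PySem.List.insert breaks1 0 0                  -- breaks.insert(0, 0)
  let cols : List (List String) := (PySem.List.pyRange 0 4 1).map (fun i =>
      (PySem.List.slice raw1 (some (PySem.List.pyGetD breaks i 0))
        (some (PySem.List.pyGetD breaks (i + 1) 0))).map (fun x => x))
  -- [raw_data[i][j] for j in range(length // 4) for i in range(4)]
  -- (the indices are always in range, so pyGetD with defaults is exact here)
  let data := (PySem.List.pyRange 0 (PySem.Int.floordiv length 4) 1).flatMap (fun j =>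
      (PySem.List.pyRange 0 4 1).map (fun i =>
        PySem.List.pyGetD (PySem.List.pyGetD cols i []) j ""))
  -- for i in range(remainders): data.append(cols[i][length // 4])
  (PySem.List.pyRange 0 remainders 1).foldl (fun acc i =>
      acc ++ [PySem.List.pyGetD (PySem.List.pyGetD cols i [])
                (PySem.Int.floordiv length 4) ""]) data

-- ===== PORT B =====
def reorder_titles_vertical_alt (raw_data : List String) : List String :=
  let data := PySem.List.slice raw_data (some 1) none          -- list(raw_data)[1:]
  let q : Int := PySem.Int.floordiv data.length 4
  let r : Int := PySem.Int.mod data.length 4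
  (PySem.List.pyRange 0 data.length 1).map (fun k =>
    PySem.List.pyGetD data
      (PySem.Int.mod k 4 * q + min (PySem.Int.mod k 4) r + PySem.Int.floordiv k 4) "")

-- ===== PRECONDITION & SPEC =====
def Spec_reorder_titles_vertical (raw_data : List String) (out : List String) : Prop := out = reorder_titles_vertical_alt raw_data
instance (raw_data : List String) (out : List String) : Decidable (Spec_reorder_titles_vertical raw_data out) := by unfold Spec_reorder_titles_vertical; infer_instance

-- ===== CLAIM (what is proved, stated in full; the proofs are below) =====
def Claim_equal_reorder_titles_vertical : Prop := ∀ (raw_data : List String), Dom_reorder_titles_vertical raw_data → Spec_reorder_titles_vertical raw_data (reorder_titles_vertical raw_data)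

-- ===== LEMMAS AND PROOFS =====

-- Shared reference form: output slot (column i, row j) reads the flat list at
-- i*q + min i r + j, where q = len//4 and r = len%4.
def pvIdx (q r i j : Nat) : Nat := i * q + min i r + j

def pvRefA (l : List String) : List String :=
  ((List.range (l.length / 4)).flatMap (fun j =>
      (List.range 4).map (fun i => l.getD (pvIdx (l.length / 4) (l.length % 4) i j) "")))
    ++ (List.range (l.length % 4)).map (fun i =>
      l.getD (pvIdx (l.length / 4) (l.length % 4) i (l.length / 4)) "")

def pvRefB (l : List String) : List String :=
  (List.range l.length).map (fun k =>
    l.getD (pvIdx (l.length / 4) (l.length % 4) (k % 4) (k / 4)) "")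

theorem pvRead (l : List String) (a m j t : Nat) (hj : j < m) (ht : t = a + j) :
    (List.take m (List.drop a l))[j]?.getD "" = l[t]?.getD "" := by
  rw [List.getElem?_take, if_pos hj, List.getElem?_drop, ht]


theorem pvMain (g : Nat → Nat → String) (q : Nat) :
    (List.range (4 * q)).map (fun k => g (k % 4) (k / 4))
      = (List.range q).flatMap (fun j => (List.range 4).map (fun i => g i j)) := by
  induction q with
  | zero => simp
  | succ q ih =>
    have h4 : 4 * (q + 1) = 4 * q + 4 := by ring
    rw [h4, List.range_add, List.map_append, ih,
      show List.range (q + 1) = List.range q ++ [q] from List.range_succ, List.flatMap_append]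
    congr 1
    simp only [List.flatMap_singleton, List.map_map]
    apply List.map_congr_left
    intro i hi
    simp only [List.mem_range] at hi
    have h1 : (4 * q + i) % 4 = i := by omega
    have h2 : (4 * q + i) / 4 = q := by omega
    simp [Function.comp, h1, h2]

theorem pvRef_eq (l : List String) : pvRefA l = pvRefB l := by
  unfold pvRefA pvRefB
  have hn : l.length = 4 * (l.length / 4) + l.length % 4 := by omega
  rw [show List.range l.length = List.range (4 * (l.length / 4) + l.length % 4) from by rw [← hn]]
  rw [List.range_add, List.map_append,
    pvMain (fun i j => l.getD (pvIdx (l.length / 4) (l.length % 4) i j) "")]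
  congr 1
  rw [List.map_map]
  apply List.map_congr_left
  intro t ht
  simp only [List.mem_range] at ht
  have h1 : (4 * (l.length / 4) + t) % 4 = t := by omega
  have h2 : (4 * (l.length / 4) + t) / 4 = l.length / 4 := by omega
  simp [Function.comp, h1, h2]

theorem pvB_eq (raw : List String) :
    reorder_titles_vertical_alt raw = pvRefB raw.tail := by
  unfold reorder_titles_vertical_alt
  rw [PySem.List.slice_from_one]
  generalize raw.tail = l
  simp only []
  unfold pvRefB
  rw [PySem.List.pyRange_zero_natCast, List.map_map]
  apply List.map_congr_left
  intro k hk
  simp only [Function.comp]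
  have e1 : PySem.Int.mod (k : Int) 4 = ((k % 4 : Nat) : Int) := by
    exact_mod_cast PySem.Int.mod_natCast k 4
  have e2 : PySem.Int.floordiv (k : Int) 4 = ((k / 4 : Nat) : Int) := by
    exact_mod_cast PySem.Int.floordiv_natCast k 4
  have e3 : PySem.Int.floordiv ((l.length : Nat) : Int) 4 = ((l.length / 4 : Nat) : Int) := by
    exact_mod_cast PySem.Int.floordiv_natCast l.length 4
  have e4 : PySem.Int.mod ((l.length : Nat) : Int) 4 = ((l.length % 4 : Nat) : Int) := by
    exact_mod_cast PySem.Int.mod_natCast l.length 4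
  rw [e1, e2, e3, e4]
  have hidx : ((k % 4 : Nat) : Int) * ((l.length / 4 : Nat) : Int)
      + min ((k % 4 : Nat) : Int) ((l.length % 4 : Nat) : Int) + ((k / 4 : Nat) : Int)
      = ((pvIdx (l.length / 4) (l.length % 4) (k % 4) (k / 4) : Nat) : Int) := by
    unfold pvIdx
    push_cast
    ring
  rw [hidx, PySem.List.pyGetD_natCast]

theorem pvA_eq (raw : List String) : reorder_titles_vertical raw = pvRefA raw.tail := by
  unfold reorder_titles_vertical
  rw [PySem.List.slice_from_one]
  generalize raw.tail = l
  have h4 : PySem.List.pyRange 0 4 1 = [0,1,2,3] := by decide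
  have e3 : PySem.Int.floordiv ((l.length : Nat) : Int) 4 = ((l.length / 4 : Nat) : Int) := by
    exact_mod_cast PySem.Int.floordiv_natCast l.length 4
  have e4 : PySem.Int.mod ((l.length : Nat) : Int) 4 = ((l.length % 4 : Nat) : Int) := by
    exact_mod_cast PySem.Int.mod_natCast l.length 4
  simp only [e3, e4, h4]
  set q := l.length / 4 with hqdef
  set r := l.length % 4 with hrdef
  have hr : r < 4 := by omega
  have hq : l.length = 4 * q + r := by omega
  have hb : PySem.List.insert (pvAccum 0 (([0,1,2,3] : List Int).map (fun i =>
      if i < ((r : Nat) : Int) then ((q : Nat) : Int) + 1 else ((q : Nat) : Int)))) 0 0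
      = [((0:Nat):Int), ((q + min 1 r : Nat):Int), ((2*q + min 2 r : Nat):Int),
         ((3*q + min 3 r : Nat):Int), ((4*q + r : Nat):Int)] := by
    simp only [List.map, pvAccum, PySem.List.insert_zero, List.cons.injEq, and_true]
    split_ifs <;> refine ⟨by omega, by omega, by omega, by omega, by omega⟩
  rw [hb]
  have hcols : (([0,1,2,3] : List Int).map (fun i =>
      (PySem.List.slice l
        (some (PySem.List.pyGetD [((0:Nat):Int), ((q + min 1 r : Nat):Int), ((2*q + min 2 r : Nat):Int),
           ((3*q + min 3 r : Nat):Int), ((4*q + r : Nat):Int)] i 0))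
        (some (PySem.List.pyGetD [((0:Nat):Int), ((q + min 1 r : Nat):Int), ((2*q + min 2 r : Nat):Int),
           ((3*q + min 3 r : Nat):Int), ((4*q + r : Nat):Int)] (i + 1) 0))).map (fun x => x)))
      = [List.take (q + min 1 r - 0) (List.drop 0 l),
         List.take (2*q + min 2 r - (q + min 1 r)) (List.drop (q + min 1 r) l),
         List.take (3*q + min 3 r - (2*q + min 2 r)) (List.drop (2*q + min 2 r) l),
         List.take (4*q + r - (3*q + min 3 r)) (List.drop (3*q + min 3 r) l)] := by
    simp only [List.map, List.map_id']
    norm_num [PySem.List.pyGetD_ofNat', List.getD]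
    have c1 : ((q:Int)) + min 1 (r:Int) = ((q + min 1 r : Nat):Int) := by omega
    have c2 : 2*((q:Int)) + min 2 (r:Int) = ((2*q + min 2 r : Nat):Int) := by omega
    have c3 : 3*((q:Int)) + min 3 (r:Int) = ((3*q + min 3 r : Nat):Int) := by omega
    have c4 : 4*((q:Int)) + (r:Int) = ((4*q + r : Nat):Int) := by omega
    simp only [c1, c2, c3, c4, PySem.List.slice_to_natCast, PySem.List.slice_natCast,
      and_self]
  rw [hcols, PySem.List.foldl_append_eq_flatMap, PySem.List.pyRange_zero_natCast q,
    PySem.List.pyRange_zero_natCast r, List.flatMap_map, List.flatMap_map,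
    ← List.map_eq_flatMap]
  have hR4 : List.range 4 = [0,1,2,3] := by decide
  unfold pvRefA
  rw [← hqdef, ← hrdef, hR4]
  congr 1
  · apply List.flatMap_congr
    intro j hj
    rw [List.mem_range] at hj
    simp only [List.map, PySem.List.pyGetD_ofNat', List.getD, PySem.List.pyGetD_natCast,
      pvIdx, List.cons.injEq, and_true]
    exact ⟨pvRead l 0 _ j _ (by omega) (by omega),
      pvRead l (q + min 1 r) _ j _ (by omega) (by omega),
      pvRead l (2*q + min 2 r) _ j _ (by omega) (by omega),
      pvRead l (3*q + min 3 r) _ j _ (by omega) (by omega)⟩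
  · apply List.map_congr_left
    intro i hi
    rw [List.mem_range] at hi
    have hi4 : i < 4 := by omega
    interval_cases i <;>
      (simp only [List.getD, PySem.List.pyGetD_natCast, pvIdx]
       exact pvRead l _ _ q _ (by omega) (by omega))

-- ===== VERDICT (by name: the statement is the Claim_ definition above) =====
theorem reorder_titles_vertical_spec : Claim_equal_reorder_titles_vertical := by
  intro raw_data _
  unfold Spec_reorder_titles_vertical
  rw [pvA_eq raw_data, pvB_eq raw_data]
  exact pvRef_eq _
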